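-- pv_equiv track=rewrite | github.com/caboooom/Algorithm | 프로그래머스/lv2/87946. 피로도/피로도.py | calc
-- ===== SOURCE A (Python) =====
-- def calc(k, ordered_lst):
--     result = 0
--     for a, b in ordered_lst:
--         if a > k or b > k:
--             return result
--         k -= b
--         result += 1
--     return result
-- ===== SOURCE B (Python) =====
-- def calc(k, ordered_lst):
--     # prefix sums of b-values strictly before each index
--     pre = []
--     s = 0
--     for _, b in ordered_lst:
--         pre.append(s)
--         s += b
--     return next((i for i, (a, b) in enumerate(ordered_lst)
--                  if a > k - pre[i] or b > k - pre[i]), len(ordered_lst))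
-- ===== Notes on version B (the rewrite author's own statement) =====
-- stated objective: alternative
-- what changed: Replaces the running-budget decrement loop with a precomputed prefix-sum table of b-values plus a separate first-failing-index scan over that table.
import Mathlib
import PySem

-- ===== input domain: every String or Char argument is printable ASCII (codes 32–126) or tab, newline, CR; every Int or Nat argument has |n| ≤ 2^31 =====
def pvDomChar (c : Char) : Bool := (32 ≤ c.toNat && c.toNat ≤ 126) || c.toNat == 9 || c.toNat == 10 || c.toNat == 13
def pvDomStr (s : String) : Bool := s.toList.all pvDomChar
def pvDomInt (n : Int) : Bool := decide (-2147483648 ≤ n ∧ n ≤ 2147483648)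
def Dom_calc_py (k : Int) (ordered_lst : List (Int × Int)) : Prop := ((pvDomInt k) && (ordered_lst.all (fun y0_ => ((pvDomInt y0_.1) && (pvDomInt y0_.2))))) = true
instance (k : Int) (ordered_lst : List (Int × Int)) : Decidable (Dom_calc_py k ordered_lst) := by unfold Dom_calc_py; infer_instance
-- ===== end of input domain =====

-- B replaces A's running-budget decrement loop with a precomputed prefix-sum table plus a separate first-failing-index scan (alternative decomposition, same cost).


-- ===== PORT A =====
-- A's loop: running budget k, counter result; stop and return result at the first dungeon with a > k or b > k.
def calcAAux (k : Int) (l : List (Int × Int)) (result : Int) : Int :=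
  match l with
  | [] => result
  | (a, b) :: t => if a > k || b > k then result else calcAAux (k - b) t (result + 1)

def calc_py (k : Int) (ordered_lst : List (Int × Int)) : Int :=
  calcAAux k ordered_lst 0

-- ===== PORT B =====
-- pre[i] = sum of b-values of dungeons strictly before index i (pass 1 of Source B)
def calcBPre (l : List (Int × Int)) (s : Int) : List Int :=
  match l with
  | [] => []
  | (_, b) :: t => s :: calcBPre t (s + b)

-- first index i with a_i > k - pre[i] or b_i > k - pre[i], else the length (pass 2 of Source B)
def calcBFind (k : Int) (l : List (Int × Int)) (pre : List Int) : Int :=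
  match l, pre with
  | (a, b) :: t, p :: ps => if a > k - p || b > k - p then 0 else 1 + calcBFind k t ps
  | _, _ => 0

def calc_py_alt (k : Int) (ordered_lst : List (Int × Int)) : Int :=
  calcBFind k ordered_lst (calcBPre ordered_lst 0)

-- ===== PRECONDITION & SPEC =====
def Spec_calc_py (k : Int) (ordered_lst : List (Int × Int)) (out : Int) : Prop := out = calc_py_alt k ordered_lst
instance (k : Int) (ordered_lst : List (Int × Int)) (out : Int) : Decidable (Spec_calc_py k ordered_lst out) := by unfold Spec_calc_py; infer_instance

-- ===== CLAIM (what is proved, stated in full; the proofs are below) =====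
def Claim_equal_calc_py : Prop := ∀ (k : Int) (ordered_lst : List (Int × Int)), Dom_calc_py k ordered_lst → Spec_calc_py k ordered_lst (calc_py k ordered_lst)

-- ===== LEMMAS AND PROOFS =====
-- Invariant: A's loop with remaining budget k' - s equals r plus B's scan with fixed k' against the prefix table started at offset s.
theorem calcAAux_eq_find (l : List (Int × Int)) :
    ∀ (k' s r : Int), calcAAux (k' - s) l r = r + calcBFind k' l (calcBPre l s) := by
  induction l with
  | nil => intro k' s r; simp [calcAAux, calcBFind]
  | cons hd t ih =>
    intro k' s r
    obtain ⟨a, b⟩ := hd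
    simp only [calcAAux, calcBPre, calcBFind]
    by_cases hb : (decide (a > k' - s) || decide (b > k' - s)) = true
    · simp [hb]
    · have hkb : k' - s - b = k' - (s + b) := by ring
      simp only [Bool.not_eq_true] at hb
      simp [hb, hkb, ih k' (s + b) (r + 1)]
      ring

-- ===== VERDICT (by name: the statement is the Claim_ definition above) =====
theorem calc_py_spec : Claim_equal_calc_py := by
  intro k l _
  unfold Spec_calc_py calc_py calc_py_alt
  have := calcAAux_eq_find l k 0 0
  simpa using this
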